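-- pv_equiv track=rewrite | github.com/Naveen-Malavath/Internship | backend/agents/page_agents.py | _build_feature_context
-- ===== SOURCE A (Python) =====
-- from typing import Dict, Any, Optional
--
-- def _build_feature_context(page: Dict) -> str:
--     """Build feature context string for prompts"""
--     parts = []
--
--     related_features = page.get('related_features', [])
--     if related_features:
--         parts.append("\nRELATED FEATURES:")
--         for f in related_features:
--             parts.append(f"  - {f}")
--
--     functionality = page.get('functionality', [])
--     if functionality:
--         parts.append("\nREQUIRED FUNCTIONALITY:")
--         for f in functionality:
--             parts.append(f"  - {f}")
--
--     ui_elements = page.get('ui_elements', [])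
--     if ui_elements:
--         parts.append("\nREQUIRED UI ELEMENTS:")
--         for e in ui_elements:
--             parts.append(f"  - {e}")
--
--     data_displayed = page.get('data_displayed', [])
--     if data_displayed:
--         parts.append("\nDATA TO DISPLAY:")
--         for d in data_displayed:
--             parts.append(f"  - {d}")
--
--     return "\n".join(parts)
-- ===== SOURCE B (Python) =====
-- _SECTIONS = [
--     ('related_features', '\nRELATED FEATURES:'),
--     ('functionality', '\nREQUIRED FUNCTIONALITY:'),
--     ('ui_elements', '\nREQUIRED UI ELEMENTS:'),
--     ('data_displayed', '\nDATA TO DISPLAY:'),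
-- ]
--
-- def _build_feature_context(page) -> str:
--     """Build feature context string for prompts.
--
--     Recursively renders each section as ONE pre-joined block string
--     (header plus its indented items), then joins the non-empty blocks.
--     """
--     def blocks(table):
--         if not table:
--             return []
--         (key, header), rest = table[0], table[1:]
--         tail = blocks(rest)
--         items = page.get(key, [])
--         if not items:
--             return tail
--         return [header + ''.join(f'\n  - {x}' for x in items)] + tail
--     return '\n'.join(blocks(_SECTIONS))
-- ===== Notes on version B (the rewrite author's own statement) =====
-- stated objective: alternative
-- what changed: Instead of accumulating one flat parts list over four unrolled blocks and joining once, B recurses over a (key, header) table building each section as a single pre-joined block string and joins the non-empty blocks at the end; equal because joining joined blocks with newline equals one flat newline-join.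
import Mathlib
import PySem

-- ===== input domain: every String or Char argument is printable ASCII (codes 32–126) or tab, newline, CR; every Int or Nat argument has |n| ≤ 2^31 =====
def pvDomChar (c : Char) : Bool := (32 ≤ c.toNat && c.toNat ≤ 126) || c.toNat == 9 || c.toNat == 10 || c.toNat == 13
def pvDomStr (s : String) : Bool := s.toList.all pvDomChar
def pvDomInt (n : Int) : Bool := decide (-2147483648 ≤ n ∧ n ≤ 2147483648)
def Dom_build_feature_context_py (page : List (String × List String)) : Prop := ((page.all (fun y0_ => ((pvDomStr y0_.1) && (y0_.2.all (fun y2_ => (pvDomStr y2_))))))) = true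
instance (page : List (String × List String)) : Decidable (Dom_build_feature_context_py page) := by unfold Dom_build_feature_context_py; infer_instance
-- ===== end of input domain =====

-- B renders each section recursively as one pre-joined block string and newline-joins the non-empty blocks, instead of A's flat parts list built by four unrolled blocks; alternative decomposition, same output.


-- ===== PORT A =====
def build_feature_context_py (page : List (String × List String)) : String :=
  let d := PySem.Dict.mk page
  let parts : List String := []
  let related_features := d.getD "related_features" []
  let parts := if related_features = [] then parts else
    related_features.foldl (fun acc f => acc ++ ["  - " ++ f]) (parts ++ ["\nRELATED FEATURES:"])
  let functionality := d.getD "functionality" []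
  let parts := if functionality = [] then parts else
    functionality.foldl (fun acc f => acc ++ ["  - " ++ f]) (parts ++ ["\nREQUIRED FUNCTIONALITY:"])
  let ui_elements := d.getD "ui_elements" []
  let parts := if ui_elements = [] then parts else
    ui_elements.foldl (fun acc e => acc ++ ["  - " ++ e]) (parts ++ ["\nREQUIRED UI ELEMENTS:"])
  let data_displayed := d.getD "data_displayed" []
  let parts := if data_displayed = [] then parts else
    data_displayed.foldl (fun acc x => acc ++ ["  - " ++ x]) (parts ++ ["\nDATA TO DISPLAY:"])
  PySem.Str.join "\n" parts

-- ===== PORT B =====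
-- B's (key, header) table, in source order
def bfcSections : List (String × String) :=
  [("related_features", "\nRELATED FEATURES:"),
   ("functionality", "\nREQUIRED FUNCTIONALITY:"),
   ("ui_elements", "\nREQUIRED UI ELEMENTS:"),
   ("data_displayed", "\nDATA TO DISPLAY:")]

-- B's inner recursion 'blocks': one pre-joined block string per non-empty section
def bfcBlocks (d : PySem.Dict String (List String)) : List (String × String) → List String
  | [] => []
  | kh :: rest =>
      let tail := bfcBlocks d rest
      let items := d.getD kh.1 []
      if items = [] then tail
      else (kh.2 ++ PySem.Str.join "" (items.map (fun x => "\n  - " ++ x))) :: tail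

def build_feature_context_py_alt (page : List (String × List String)) : String :=
  PySem.Str.join "\n" (bfcBlocks (PySem.Dict.mk page) bfcSections)

-- ===== PRECONDITION & SPEC =====
def Spec_build_feature_context_py (page : List (String × List String)) (out : String) : Prop := out = build_feature_context_py_alt page
instance (page : List (String × List String)) (out : String) : Decidable (Spec_build_feature_context_py page out) := by unfold Spec_build_feature_context_py; infer_instance

-- ===== CLAIM (what is proved, stated in full; the proofs are below) =====
def Claim_equal_build_feature_context_py : Prop := ∀ (page : List (String × List String)), Dom_build_feature_context_py page → Spec_build_feature_context_py page (build_feature_context_py page)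

-- ===== LEMMAS AND PROOFS =====

-- the parts a single A-section contributes
def bfcSecParts (items : List String) (h : String) : List String :=
  if items = [] then [] else h :: items.map (fun x => "  - " ++ x)

lemma bfc_fold_app (xs : List String) (acc : List String) :
    xs.foldl (fun a f => a ++ ["  - " ++ f]) acc = acc ++ xs.map (fun x => "  - " ++ x) := by
  induction xs generalizing acc with
  | nil => simp
  | cons x xs ih => simp [List.foldl, ih]

-- one A-step appends that section's parts
lemma bfc_step (items : List String) (h : String) (parts : List String) :
    (if items = [] then parts else
      items.foldl (fun a f => a ++ ["  - " ++ f]) (parts ++ [h])) = parts ++ bfcSecParts items h := by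
  unfold bfcSecParts
  split_ifs with hc
  · simp
  · rw [bfc_fold_app]; simp

lemma bfc_step_nil (items : List String) (h : String) :
    (if items = [] then ([] : List String) else
      items.foldl (fun a f => a ++ ["  - " ++ f]) [h]) = bfcSecParts items h := by
  have := bfc_step items h []
  simpa using this

lemma cjoin_cons (sep : List Char) (x : List Char) (xs : List (List Char)) :
    PySem.Chars.join sep (x :: xs) = x ++ (if xs = [] then [] else sep ++ PySem.Chars.join sep xs) := by
  cases xs with
  | nil => simp [PySem.Chars.join_singleton]
  | cons y ys => simp [PySem.Chars.join_cons_cons]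

lemma sjoin_cons (sep : String) (x : String) (xs : List String) :
    PySem.Str.join sep (x :: xs) = x ++ (if xs = [] then "" else sep ++ PySem.Str.join sep xs) := by
  apply String.toList_inj.mp
  cases xs with
  | nil => simp [PySem.Str.toList_join, PySem.Chars.join_singleton]
  | cons y ys =>
    simp [PySem.Str.toList_join, PySem.Chars.join_cons_cons, String.toList_append]

lemma sjoin_append (sep : String) (xs ys : List String) (hx : xs ≠ []) :
    PySem.Str.join sep (xs ++ ys) =
      PySem.Str.join sep xs ++ (if ys = [] then "" else sep ++ PySem.Str.join sep ys) := by
  induction xs with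
  | nil => simp at hx
  | cons x t ih =>
    cases t with
    | nil =>
      simp only [List.nil_append, List.cons_append, sjoin_cons]
      split_ifs <;> simp_all
    | cons a b =>
      rw [List.cons_append, sjoin_cons, ih (by simp), sjoin_cons sep x (a :: b)]
      simp [String.append_assoc]

-- joining the per-section joins equals one flat join
lemma bfc_key (sep : String) (ls : List (List String)) :
    PySem.Str.join sep ls.flatten =
      PySem.Str.join sep (ls.filterMap (fun l => if l = [] then none else some (PySem.Str.join sep l))) := by
  induction ls with
  | nil => simp
  | cons l t ih =>
    by_cases hl : l = []
    · simp [hl, ih]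
    · have hiff : t.flatten = [] ↔
          (t.filterMap (fun l => if l = [] then none else some (PySem.Str.join sep l))) = [] := by
        simp only [List.flatten_eq_nil_iff, List.filterMap_eq_nil_iff]
        constructor
        · intro h a ha; simp [h a ha]
        · intro h a ha
          have := h a ha
          by_cases hae : a = []
          · exact hae
          · simp [hae] at this
      rw [List.flatten_cons, sjoin_append sep l t.flatten hl,
          List.filterMap_cons_some (b := PySem.Str.join sep l) (by simp [hl]), sjoin_cons, ih]
      by_cases hf : t.flatten = []
      · simp [hf, hiff.mp hf]
      · have : ¬ (t.filterMap (fun l => if l = [] then none else some (PySem.Str.join sep l))) = [] := by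
          intro h; exact hf (hiff.mpr h)
        simp [hf, this]

lemma cblock (h : List Char) (its : List (List Char)) :
    h ++ PySem.Chars.join [] (its.map (fun m => '\n' :: m)) = PySem.Chars.join ['\n'] (h :: its) := by
  induction its generalizing h with
  | nil => simp [PySem.Chars.join_nil, PySem.Chars.join_singleton]
  | cons m t ih =>
    rw [List.map_cons, cjoin_cons, PySem.Chars.join_cons_cons, ← ih m]
    by_cases ht : t = [] <;> simp [ht]

-- a B block string IS the newline-join of that section's A-parts
lemma bfc_block (h : String) (items : List String) :
    h ++ PySem.Str.join "" (items.map (fun x => "\n  - " ++ x)) =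
      PySem.Str.join "\n" (h :: items.map (fun x => "  - " ++ x)) := by
  apply String.toList_inj.mp
  simp only [String.toList_append, PySem.Str.toList_join, List.map_cons, List.map_map]
  have : (String.toList ∘ fun x => "\n  - " ++ x) =
      (fun m => '\n' :: m) ∘ (String.toList ∘ fun x => "  - " ++ x) := by
    funext x; simp [String.toList_append]
  rw [this, ← List.map_map]
  rw [show ("" : String).toList = [] from rfl, show ("\n" : String).toList = ['\n'] from rfl, cblock]

-- B's recursion = filterMap of the per-section joined parts
lemma bfc_blocks_eq (d : PySem.Dict String (List String)) (tbl : List (String × String)) :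
    bfcBlocks d tbl =
      (tbl.map (fun kh => bfcSecParts (d.getD kh.1 []) kh.2)).filterMap
        (fun l => if l = [] then none else some (PySem.Str.join "\n" l)) := by
  induction tbl with
  | nil => simp [bfcBlocks]
  | cons kh rest ih =>
    by_cases hi : d.getD kh.1 [] = []
    · simp [bfcBlocks, hi, ih, bfcSecParts]
    · rw [show bfcBlocks d (kh :: rest)
            = (kh.2 ++ PySem.Str.join "" ((d.getD kh.1 []).map (fun x => "\n  - " ++ x))) :: bfcBlocks d rest
          from by simp [bfcBlocks, hi],
        List.map_cons,
        show bfcSecParts (d.getD kh.1 []) kh.2 = kh.2 :: (d.getD kh.1 []).map (fun x => "  - " ++ x)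
          from by simp [bfcSecParts, hi],
        List.filterMap_cons_some (b := PySem.Str.join "\n" (kh.2 :: (d.getD kh.1 []).map (fun x => "  - " ++ x))) (by simp),
        ← ih, bfc_block]

-- ===== VERDICT (by name: the statement is the Claim_ definition above) =====
theorem build_feature_context_py_spec : Claim_equal_build_feature_context_py := by
  intro page _
  unfold Spec_build_feature_context_py build_feature_context_py build_feature_context_py_alt
  simp only [bfc_step, bfc_step_nil, List.nil_append]
  rw [bfc_blocks_eq]
  have : bfcSecParts (PySem.Dict.getD (PySem.Dict.mk page) "related_features" []) "\nRELATED FEATURES:" ++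
      bfcSecParts (PySem.Dict.getD (PySem.Dict.mk page) "functionality" []) "\nREQUIRED FUNCTIONALITY:" ++
      bfcSecParts (PySem.Dict.getD (PySem.Dict.mk page) "ui_elements" []) "\nREQUIRED UI ELEMENTS:" ++
      bfcSecParts (PySem.Dict.getD (PySem.Dict.mk page) "data_displayed" []) "\nDATA TO DISPLAY:" =
      ([bfcSecParts (PySem.Dict.getD (PySem.Dict.mk page) "related_features" []) "\nRELATED FEATURES:",
        bfcSecParts (PySem.Dict.getD (PySem.Dict.mk page) "functionality" []) "\nREQUIRED FUNCTIONALITY:",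
        bfcSecParts (PySem.Dict.getD (PySem.Dict.mk page) "ui_elements" []) "\nREQUIRED UI ELEMENTS:",
        bfcSecParts (PySem.Dict.getD (PySem.Dict.mk page) "data_displayed" []) "\nDATA TO DISPLAY:"] : List (List String)).flatten := by
    simp
  rw [this, bfc_key]
  simp [bfcSections]
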